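-- pv_equiv track=rewrite | github.com/ishtiq10001/CPS109_Assignments | assignment 2/PythonProblems-main/a2_109_sub.py | question_27
-- ===== SOURCE A (Python) =====
-- def med(L):
--     a = L[0]
--     b = L[1]
--     c = L[2]
--     if (a >= b or a >= c) and (a <= c or a <= b):
--         return a        #a is the median
--     elif (b >= a or b >= c) and (b <= a or b <= c):
--         return b
--     elif (c >= b or c >= a) and (c <= a or c <= b):
--         return c
--     else:
--         return
--
-- def question_27(L):
--     temp = []
--     if len(L) == 1:
--         return L[0]
--
--     else:
--         temp = med(L)
--
--         L = L[3:len(L)]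
--         L.append(temp)
--         return question_27(L)
-- ===== SOURCE B (Python) =====
-- def question_27(L):
--     while len(L) != 1:
--         a, b, c = L[0], L[1], L[2]
--         L = L[3:] + [sorted((a, b, c))[1]]
--     return L[0]
-- ===== Notes on version B (the rewrite author's own statement) =====
-- stated objective: simpler
-- what changed: Replaces the recursion and the hand-written branchy median-of-three helper with a single iterative loop that takes the median as sorted((a,b,c))[1], never mutating the caller's list.
import Mathlib
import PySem

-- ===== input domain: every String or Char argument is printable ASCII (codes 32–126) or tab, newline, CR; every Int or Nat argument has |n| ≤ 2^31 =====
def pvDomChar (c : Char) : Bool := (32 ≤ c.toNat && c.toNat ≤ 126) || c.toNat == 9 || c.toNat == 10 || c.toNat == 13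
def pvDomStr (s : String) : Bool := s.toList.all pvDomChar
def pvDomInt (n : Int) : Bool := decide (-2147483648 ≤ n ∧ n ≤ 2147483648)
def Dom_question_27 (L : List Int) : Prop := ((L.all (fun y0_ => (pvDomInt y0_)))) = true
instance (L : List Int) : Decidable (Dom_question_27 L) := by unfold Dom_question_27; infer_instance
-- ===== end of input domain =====

-- B replaces the recursion and the branchy median helper with an iterative FIFO loop whose
-- median of the first three elements is sorted((a,b,c))[1]; same cost, plainly shorter.

-- ===== PORT A =====
def medA (L : List Int) : Int :=
  match L with
  | a :: b :: c :: _ =>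
    if (a ≥ b ∨ a ≥ c) ∧ (a ≤ c ∨ a ≤ b) then a
    else if (b ≥ a ∨ b ≥ c) ∧ (b ≤ a ∨ b ≤ c) then b
    else if (c ≥ b ∨ c ≥ a) ∧ (c ≤ a ∨ c ≤ b) then c
    else 0  -- Python 'return' (None); unreachable for integers
  | _ => 0  -- Python: IndexError (fewer than 3 elements); excluded by Pre_question_27

def question_27 (L : List Int) : Int :=
  if L.length = 1 then (PySem.List.pyGet? L 0).getD 0
  else if L.length = 0 then 0  -- Python: IndexError inside med; excluded by Pre_question_27
  else question_27 (PySem.List.slice L (some 3) (some (L.length : Int)) ++ [medA L])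
termination_by L.length
decreasing_by
  simp [PySem.List.slice]
  omega

-- ===== PORT B =====
def question_27_alt (L : List Int) : Int :=
  if L.length ≠ 1 then
    match L with
    | a :: b :: c :: rest =>
        -- L = L[3:] + [sorted((a, b, c))[1]]
        question_27_alt (rest ++
          [(PySem.List.pyGet? (PySem.List.sorted [a, b, c] (fun x => x) false) 1).getD 0])
    | _ => 0  -- Python: IndexError on L[0]/L[1]/L[2]; excluded by Pre_question_27
  else (PySem.List.pyGet? L 0).getD 0
termination_by L.length
decreasing_by
  simp

-- ===== PRECONDITION & SPEC =====
-- Both programs raise IndexError exactly on even-length lists (each step removes two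
-- elements, so an even length reaches 0 or 2 where the third-element access fails);
-- Pre_ keeps the odd lengths, on which A returns normally.
def Pre_question_27 (L : List Int) : Prop := L.length % 2 = 1
instance (L : List Int) : Decidable (Pre_question_27 L) := by unfold Pre_question_27; infer_instance
def pvWitness_question_27 : List Int := ([1, 2, 3])

def Spec_question_27 (L : List Int) (out : Int) : Prop := out = question_27_alt L
instance (L : List Int) (out : Int) : Decidable (Spec_question_27 L out) := by unfold Spec_question_27; infer_instance

-- ===== CLAIM (what is proved, stated in full; the proofs are below) =====
def Claim_equal_question_27 : Prop := ∀ (L : List Int), Dom_question_27 L → Pre_question_27 L → Spec_question_27 L (question_27 L)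

-- ===== LEMMAS AND PROOFS =====

-- A's comparison-chain median-of-three equals B's sorted-triple middle element.
theorem med3_eq (a b c : Int) (rest : List Int) :
    medA (a :: b :: c :: rest)
      = (PySem.List.pyGet? (PySem.List.sorted [a, b, c] (fun x => x) false) 1).getD 0 := by
  by_cases h1 : b < a <;> by_cases h2 : c < a <;> by_cases h3 : c < b <;>
    simp [PySem.List.sorted, PySem.List.insertBy, h1, h2, h3,
      PySem.List.pyGet?, PySem.List.pyIdx?, medA] <;>
    split_ifs <;> omega

-- Python's L[3:len(L)] is drop 3.
theorem slice3_eq (L : List Int) :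
    PySem.List.slice L (some 3) (some (L.length : Int)) = L.drop 3 := by
  simp [PySem.List.slice]
  rcases Nat.le_total L.length 3 with h | h
  · simp [Nat.min_eq_right h, List.drop_eq_nil_of_le h]
  · rw [Nat.min_eq_left h]
    exact List.take_of_length_le (by simp)

-- Both ports satisfy the same length-decreasing recurrence on odd lengths.
theorem q27_eq_aux : ∀ (n : Nat) (L : List Int), L.length ≤ n → L.length % 2 = 1 →
    question_27 L = question_27_alt L := by
  intro n
  induction n with
  | zero => intro L hl hp; omega
  | succ n ih =>
    intro L hl hp
    by_cases h1 : L.length = 1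
    · rw [question_27, question_27_alt.eq_def]
      simp [h1]
    · have h3 : 3 ≤ L.length := by omega
      match L with
      | a :: b :: c :: rest =>
        rw [question_27, question_27_alt.eq_def, slice3_eq]
        rw [if_neg h1]
        rw [if_neg (by simp : ¬((a::b::c::rest).length = 0))]
        simp only [ne_eq, h1, not_false_eq_true, if_true, List.drop_succ_cons, List.drop_zero]
        rw [← med3_eq a b c rest]
        exact ih _ (by simp at hl ⊢; omega) (by simp at hp ⊢; omega)

-- ===== VERDICT (by name: the statement is the Claim_ definition above) =====
theorem question_27_spec : Claim_equal_question_27 := by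
  intro L _ hP
  exact q27_eq_aux L.length L le_rfl hP
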